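-- pv_equiv track=rewrite | github.com/kelvinhuang0327/number-pattern-research | tools/power_triple_strike.py | tail_balance_bet
-- ===== SOURCE A (Python) =====
-- from collections import Counter
--
-- def tail_balance_bet(history, window=100, exclude=None):
--     """
--     注3: Tail Balance (尾數平衡)
--     原理: 確保選出的 6 個號碼覆蓋至少 5 種不同尾數
--
--     步驟:
--     1. 計算每個尾數 (0-9) 的近期頻率
--     2. 從每個尾數中選出頻率最高的號碼
--     3. 優先選擇覆蓋不同尾數的號碼
--     """
--     if exclude is None:
--         exclude = set()
--
--     recent = history[-window:] if len(history) >= window else history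
--     all_nums = [n for d in recent for n in d['numbers']]
--     freq = Counter(all_nums)
--
--     # 按尾數分組
--     tail_groups = {i: [] for i in range(10)}
--     for n in range(1, 39):
--         if n not in exclude:
--             tail = n % 10
--             tail_groups[tail].append((n, freq.get(n, 0)))
--
--     # 每組按頻率排序
--     for tail in tail_groups:
--         tail_groups[tail].sort(key=lambda x: x[1], reverse=True)
--
--     # 策略: 從不同尾數中輪流選取
--     selected = []
--     # 先從有號碼的尾數組中各選一個最熱門的
--     available_tails = [t for t in range(10) if tail_groups[t]]
--
--     # 按組內最高頻率排序尾數組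
--     available_tails.sort(key=lambda t: tail_groups[t][0][1] if tail_groups[t] else 0, reverse=True)
--
--     # 輪流從各尾數組選取
--     idx_in_group = {t: 0 for t in range(10)}
--     round_num = 0
--
--     while len(selected) < 6:
--         for tail in available_tails:
--             if len(selected) >= 6:
--                 break
--             group = tail_groups[tail]
--             idx = idx_in_group[tail]
--             if idx < len(group):
--                 num, _ = group[idx]
--                 if num not in selected:
--                     selected.append(num)
--                     idx_in_group[tail] += 1
--         round_num += 1
--         if round_num > 10:  # 防止無限循環
--             break
--
--     # 如果還不夠 6 個，從剩餘號碼中補充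
--     if len(selected) < 6:
--         remaining = [n for n in range(1, 39) if n not in selected and n not in exclude]
--         remaining.sort(key=lambda x: freq.get(x, 0), reverse=True)
--         selected.extend(remaining[:6 - len(selected)])
--
--     return sorted(selected[:6])
-- ===== SOURCE B (Python) =====
-- from collections import Counter
--
--
-- def tail_balance_bet(history, window=100, exclude=None):
--     """Flat keyed selection: instead of a stateful round-robin while-loop, give every
--     candidate one scalar key 10*(its rank inside its tail group) + (its tail group's
--     rank) and take the 6 smallest keys in one stable sort (ranks are < 10, so the
--     combined integer key is exactly the lexicographic (index-in-group, tail-rank))."""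
--     excluded = set(exclude) if exclude is not None else set()
--     recent = history[-window:] if len(history) >= window else history
--     nums = [n for d in recent for n in d['numbers']]
--     cand = [n for n in range(1, 39) if n not in excluded]
--     freq = Counter(nums)
--     groups = {t: sorted((n for n in cand if n % 10 == t),
--                         key=lambda n: freq[n], reverse=True)
--               for t in range(10)}
--     ranked = sorted((t for t in range(10) if groups[t]),
--                     key=lambda t: freq[groups[t][0]], reverse=True)
--     rank = {t: r for r, t in enumerate(ranked)}
--     pick = sorted(cand,
--                   key=lambda n: 10 * groups[n % 10].index(n) + rank[n % 10])
--     return sorted(pick[:6])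
-- ===== Notes on version B (the rewrite author's own statement) =====
-- stated objective: simpler
-- what changed: A's stateful round-robin selection (per-tail cursor dict, membership test, round counter with a cap, and a leftover-fill branch) is replaced by one flat stable sort: every candidate gets the scalar key 10*(its index inside its tail group) + (its tail group's rank), and the 6 smallest keys are taken; the fill branch is proved dead.
import Mathlib
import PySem

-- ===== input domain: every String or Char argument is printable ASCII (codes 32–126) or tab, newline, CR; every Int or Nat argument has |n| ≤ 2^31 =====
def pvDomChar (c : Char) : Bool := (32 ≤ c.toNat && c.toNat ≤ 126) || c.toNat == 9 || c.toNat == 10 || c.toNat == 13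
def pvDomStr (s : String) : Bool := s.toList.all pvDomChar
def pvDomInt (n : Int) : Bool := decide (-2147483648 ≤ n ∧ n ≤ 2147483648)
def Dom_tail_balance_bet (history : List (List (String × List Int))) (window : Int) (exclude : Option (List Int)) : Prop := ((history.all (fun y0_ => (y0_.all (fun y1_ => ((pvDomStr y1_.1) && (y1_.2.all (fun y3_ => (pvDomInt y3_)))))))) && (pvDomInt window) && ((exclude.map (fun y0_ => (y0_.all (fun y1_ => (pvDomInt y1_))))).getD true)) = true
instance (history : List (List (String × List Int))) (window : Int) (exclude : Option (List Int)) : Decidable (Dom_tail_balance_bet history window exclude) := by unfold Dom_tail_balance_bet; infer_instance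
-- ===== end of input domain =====

-- B replaces A's stateful round-robin while-loop (per-tail cursor dict, membership
-- test, round counter, leftover-fill branch) by ONE stable keyed sort: every
-- candidate gets the scalar key 10*(index inside its tail group) + (tail-group
-- rank), and the 6 smallest keys are taken.  Objective: simpler.

-- ===== PORT A =====
-- while-loop: fuel 11 = the 'round_num > 10' cap of the Python (round_num after k
-- iterations is k, so the loop body runs at most 11 times); fuel 0 is the break.
def tailBalanceLoopA (tg : PySem.Dict Int (List (Int × Int))) (avail : List Int) :
    Nat → List Int → PySem.Dict Int Int → List Int
  | 0, selected, _ => selected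
  | fuel+1, selected, idx =>
    if (selected.length : Int) < 6 then
      let st := avail.foldl (fun (acc : List Int × PySem.Dict Int Int) tail =>
        if (6 : Int) ≤ (acc.1.length : Int) then acc
        else
          let group := tg.getD tail []
          let i := acc.2.getD tail 0
          if i < (group.length : Int) then
            let num := (PySem.List.pyGetD group i (0, 0)).1
            if num ∈ acc.1 then acc
            else (acc.1 ++ [num], acc.2.insert tail (i + 1))
          else acc) (selected, idx)
      tailBalanceLoopA tg avail fuel st.1 st.2
    else selected

def tail_balance_bet (history : List (List (String × List Int))) (window : Int) (exclude : Option (List Int)) : List Int :=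
  let excl : List Int := exclude.getD []
  let recent := if (history.length : Int) ≥ window then PySem.List.slice history (some (-window)) none else history
  let all_nums := recent.foldl (fun acc d => acc ++ (PySem.Dict.mk d).getD "numbers" []) []
  let freq := PySem.Dict.counter all_nums
  let tg0 := (PySem.List.pyRange 0 10 1).foldl (fun d t => d.insert t ([] : List (Int × Int))) PySem.Dict.empty
  let tg1 := (PySem.List.pyRange 1 39 1).foldl (fun d n =>
      if n ∉ excl then d.modify (PySem.Int.mod n 10) [] (· ++ [(n, freq.getD n 0)]) else d) tg0
  let tg2 := tg1.keys.foldl (fun d t => d.insert t (PySem.List.sorted (d.getD t []) (fun x => x.2) true)) tg1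
  let avail0 := (PySem.List.pyRange 0 10 1).filter (fun t => !(tg2.getD t []).isEmpty)
  let avail := PySem.List.sorted avail0
      (fun t => if (tg2.getD t []).isEmpty then 0 else (PySem.List.pyGetD (tg2.getD t []) 0 (0, 0)).2) true
  let idx0 := (PySem.List.pyRange 0 10 1).foldl (fun d t => d.insert t (0 : Int)) PySem.Dict.empty
  let selected := tailBalanceLoopA tg2 avail 11 [] idx0
  let selected2 :=
    if (selected.length : Int) < 6 then
      let remaining := (PySem.List.pyRange 1 39 1).filter (fun n => n ∉ selected ∧ n ∉ excl)
      let remaining2 := PySem.List.sorted remaining (fun x => freq.getD x 0) true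
      selected ++ PySem.List.slice remaining2 none (some (6 - (selected.length : Int)))
    else selected
  PySem.List.sorted (PySem.List.slice selected2 none (some 6)) (fun x => x) false

-- ===== PORT B =====
def tail_balance_bet_alt (history : List (List (String × List Int))) (window : Int) (exclude : Option (List Int)) : List Int :=
  let excluded : PySem.Set Int := PySem.Set.ofList (exclude.getD [])
  let recent := if (history.length : Int) ≥ window then PySem.List.slice history (some (-window)) none else history
  let nums := recent.foldl (fun acc d => acc ++ (PySem.Dict.mk d).getD "numbers" []) []
  let cand := (PySem.List.pyRange 1 39 1).filter (fun n => n ∉ excluded)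
  let freq := PySem.Dict.counter nums
  let groups := (PySem.List.pyRange 0 10 1).foldl (fun d t =>
      d.insert t (PySem.List.sorted (cand.filter (fun n => PySem.Int.mod n 10 == t)) (fun n => freq.getD n 0) true)) PySem.Dict.empty
  let ranked := PySem.List.sorted ((PySem.List.pyRange 0 10 1).filter (fun t => !(groups.getD t []).isEmpty))
      (fun t => freq.getD (PySem.List.pyGetD (groups.getD t []) 0 0) 0) true
  let rank := (PySem.List.enumerate ranked 0).foldl (fun d p => d.insert p.2 p.1) PySem.Dict.empty
  let pick := PySem.List.sorted cand
      (fun n => 10 * (((PySem.List.index? (groups.getD (PySem.Int.mod n 10) []) n).getD 0 : Nat) : Int)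
                + rank.getD (PySem.Int.mod n 10) 0) false
  PySem.List.sorted (PySem.List.slice pick none (some 6)) (fun x => x) false

-- ===== PRECONDITION & SPEC =====
-- Pre_ excludes exactly the inputs on which A raises KeyError: some draw inside the
-- examined window (history[-window:] when len(history) >= window, else all of
-- history) has no "numbers" key.
def Pre_tail_balance_bet (history : List (List (String × List Int))) (window : Int) (exclude : Option (List Int)) : Prop :=
  ∀ d ∈ (if (history.length : Int) ≥ window then PySem.List.slice history (some (-window)) none else history),
    (PySem.Dict.mk d).contains "numbers" = true
instance (history : List (List (String × List Int))) (window : Int) (exclude : Option (List Int)) : Decidable (Pre_tail_balance_bet history window exclude) := by unfold Pre_tail_balance_bet; infer_instance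

def pvWitness_tail_balance_bet : (List (List (String × List Int))) × Int × Option (List Int) :=
  ([[("numbers", [1, 2, 3, 11])]], 100, none)

def Spec_tail_balance_bet (history : List (List (String × List Int))) (window : Int) (exclude : Option (List Int)) (out : List Int) : Prop := out = tail_balance_bet_alt history window exclude
instance (history : List (List (String × List Int))) (window : Int) (exclude : Option (List Int)) (out : List Int) : Decidable (Spec_tail_balance_bet history window exclude out) := by unfold Spec_tail_balance_bet; infer_instance

-- ===== CLAIM (what is proved, stated in full; the proofs are below) =====
def Claim_equal_tail_balance_bet : Prop := ∀ (history : List (List (String × List Int))) (window : Int) (exclude : Option (List Int)), Dom_tail_balance_bet history window exclude → Pre_tail_balance_bet history window exclude → Spec_tail_balance_bet history window exclude (tail_balance_bet history window exclude)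

-- ===== LEMMAS AND PROOFS =====

-- Common abbreviations for both ports' intermediate data (proof-only helpers).

def pvNums (history : List (List (String × List Int))) (window : Int) : List Int :=
  (if (history.length : Int) ≥ window then PySem.List.slice history (some (-window)) none else history).foldl
    (fun acc d => acc ++ (PySem.Dict.mk d).getD "numbers" []) []

def pvF (nums : List Int) : Int → Int := fun n => (nums.count n : Int)

def pvCand (excl : List Int) : List Int :=
  (PySem.List.pyRange 1 39 1).filter (fun n => n ∉ excl)

def pvRawg (excl : List Int) (t : Int) : List Int :=
  (pvCand excl).filter (fun n => PySem.Int.mod n 10 == t)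

def pvG (excl nums : List Int) (t : Int) : List Int :=
  PySem.List.sorted (pvRawg excl t) (pvF nums) true

def pvAvailBase (excl nums : List Int) : List Int :=
  (PySem.List.pyRange 0 10 1).filter (fun t => !(pvG excl nums t).isEmpty)

def pvAvail (excl nums : List Int) : List Int :=
  PySem.List.sorted (pvAvailBase excl nums) (fun t => pvF nums ((pvG excl nums t).headD 0)) true

def pvChunk (g : Int → List Int) (avail : List Int) (k : Nat) : List Int :=
  avail.filterMap (fun t => (g t)[k]?)

def pvP (g : Int → List Int) (avail : List Int) (k : Nat) : List Int :=
  (List.range k).flatMap (pvChunk g avail)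

def pvStream (excl nums : List Int) : List Int :=
  pvP (pvG excl nums) (pvAvail excl nums) 11

def pvResult (excl nums : List Int) : List Int :=
  PySem.List.sorted ((pvStream excl nums).take 6) (fun x => x) false

theorem insertBy_nil {α : Type} (p : α → α → Bool) (x : α) : PySem.List.insertBy p x [] = [x] := rfl

theorem insertBy_cons {α : Type} (p : α → α → Bool) (x y : α) (ys : List α) :
    PySem.List.insertBy p x (y :: ys) = if p x y then x :: y :: ys else y :: PySem.List.insertBy p x ys := by
  cases ys <;> rfl

theorem pv_insertBy_congr {α : Type} (p q : α → α → Bool) (x : α) (ys : List α)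
    (h : ∀ y ∈ ys, p x y = q x y) : PySem.List.insertBy p x ys = PySem.List.insertBy q x ys := by
  induction ys with
  | nil => rfl
  | cons y ys ih =>
    rw [insertBy_cons, insertBy_cons, h y (by simp)]
    rw [ih (fun z hz => h z (by simp [hz]))]

theorem pv_mem_insertBy {α : Type} (p : α → α → Bool) (x z : α) (ys : List α)
    (hz : z ∈ PySem.List.insertBy p x ys) : z = x ∨ z ∈ ys := by
  induction ys with
  | nil => simpa [insertBy_nil] using hz
  | cons y ys ih =>
    rw [insertBy_cons] at hz
    split at hz
    · simpa using hz
    · rcases (by simpa using hz) with h | h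
      · simp [h]
      · rcases ih h with h | h <;> simp [h]

theorem pv_sorted_rev_congr {α κ : Type} [LinearOrder κ] (xs : List α) (k1 k2 : α → κ)
    (h : ∀ x ∈ xs, k1 x = k2 x) :
    PySem.List.sorted xs k1 true = PySem.List.sorted xs k2 true := by
  rw [PySem.List.sorted_rev_eq_foldl_insertBy, PySem.List.sorted_rev_eq_foldl_insertBy]
  have main : ∀ (l acc : List α), (∀ x ∈ l, k1 x = k2 x) → (∀ x ∈ acc, k1 x = k2 x) →
      l.foldl (fun acc x => PySem.List.insertBy (fun a b => decide (k1 b < k1 a)) x acc) acc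
        = l.foldl (fun acc x => PySem.List.insertBy (fun a b => decide (k2 b < k2 a)) x acc) acc := by
    intro l
    induction l with
    | nil => intro acc _ _; rfl
    | cons x l ih =>
      intro acc hl hacc
      simp only [List.foldl_cons]
      rw [pv_insertBy_congr _ (fun a b => decide (k2 b < k2 a)) x acc
        (fun y hy => by rw [hacc y hy, hl x (by simp)])]
      exact ih _ (fun z hz => hl z (by simp [hz]))
        (fun z hz => by rcases pv_mem_insertBy _ _ _ _ hz with h' | h'
                        · subst h'; exact hl z (by simp)
                        · exact hacc z h')
  exact main xs [] h (by simp)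

theorem pv_insertBy_map {α β : Type} (g : α → β) (p : α → α → Bool) (q : β → β → Bool)
    (hpq : ∀ a b, q (g a) (g b) = p a b) (x : α) (l : List α) :
    PySem.List.insertBy q (g x) (l.map g) = (PySem.List.insertBy p x l).map g := by
  induction l with
  | nil => rfl
  | cons y l ih =>
    simp only [List.map_cons, insertBy_cons, hpq]
    split <;> simp [ih]

theorem pv_sorted_rev_map_pair (l : List Int) (f : Int → Int) :
    PySem.List.sorted (l.map (fun n => (n, f n))) (fun x => x.2) true
      = (PySem.List.sorted l f true).map (fun n => (n, f n)) := by
  rw [PySem.List.sorted_rev_eq_foldl_insertBy, PySem.List.sorted_rev_eq_foldl_insertBy]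
  have main : ∀ (l' acc : List Int),
      (l'.map (fun n => (n, f n))).foldl (fun acc x => PySem.List.insertBy (fun a b => decide ((fun x : Int × Int => x.2) b < (fun x : Int × Int => x.2) a)) x acc) (acc.map (fun n => (n, f n)))
        = (l'.foldl (fun acc x => PySem.List.insertBy (fun a b => decide (f b < f a)) x acc) acc).map (fun n => (n, f n)) := by
    intro l'
    induction l' with
    | nil => intro acc; rfl
    | cons x l' ih =>
      intro acc
      simp only [List.map_cons, List.foldl_cons]
      rw [pv_insertBy_map (fun n => (n, f n)) (fun a b => decide (f b < f a)) _ (by intro a b; rfl) x acc]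
      exact ih _
  simpa using main l []

theorem pv_partition_perm {α : Type} (tag : α → Int) (l : List α) (ts : List Int)
    (hnd : ts.Nodup) (hmem : ∀ x ∈ l, tag x ∈ ts) :
    (ts.flatMap (fun t => l.filter (fun x => tag x == t))).Perm l := by
  induction ts generalizing l with
  | nil =>
    have : l = [] := by
      cases l with
      | nil => rfl
      | cons x l => exact absurd (hmem x (by simp)) (by simp)
    simp [this]
  | cons t ts ih =>
    have hnd' := (List.nodup_cons.mp hnd).2
    have htn : t ∉ ts := (List.nodup_cons.mp hnd).1
    simp only [List.flatMap_cons]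
    have hrw : ∀ t' ∈ ts, l.filter (fun x => tag x == t')
        = (l.filter (fun x => !(tag x == t))).filter (fun x => tag x == t') := by
      intro t' ht'
      rw [List.filter_filter]
      apply List.filter_congr
      intro x _
      by_cases h : tag x = t'
      · simp [h]
        rintro rfl; exact htn ht'
      · simp [h]
    have : ts.flatMap (fun t' => l.filter (fun x => tag x == t'))
        = ts.flatMap (fun t' => (l.filter (fun x => !(tag x == t))).filter (fun x => tag x == t')) := by
      apply List.flatMap_congr
      exact hrw
    rw [this]
    have hperm := ih (l.filter (fun x => !(tag x == t))) hnd' (by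
      intro x hx
      rcases List.mem_filter.mp hx with ⟨hxl, hxt⟩
      have hm := hmem x hxl
      rcases List.mem_cons.mp hm with h | h
      · exfalso; revert hxt; simp [h]
      · simpa using h)
    refine (List.Perm.append_left _ hperm).trans ?_
    have := List.filter_append_perm (fun x => tag x == t) l
    simpa using this

theorem pv_getD_foldl_insert_const' {κ ν : Type} [BEq κ] [LawfulBEq κ] [DecidableEq κ]
    (l : List κ) (c : ν) (d : PySem.Dict κ ν) (k : κ) (hd : d.getD k c = c) :
    ((l.foldl (fun d t => d.insert t c) d).getD k c) = c := by
  induction l generalizing d with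
  | nil => exact hd
  | cons t l ih =>
    simp only [List.foldl_cons]
    refine ih _ ?_
    rw [PySem.Dict.getD_insert]
    split <;> simp [hd]

theorem pv_getD_foldl_insert_fresh {κ ν : Type} [BEq κ] [LawfulBEq κ] {β : Type}
    (l : List β) (key : β → κ) (v : β → ν) (k : κ) (dflt : ν)
    (hnd : (l.map key).Nodup) (x : β) (hx : x ∈ l) (hk : key x = k) :
    ((l.foldl (fun d a => d.insert (key a) (v a)) PySem.Dict.empty).getD k dflt) = v x := by
  have hit := PySem.Dict.items_foldl_insert_fresh l key v PySem.Dict.empty (by simp) hnd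
  have hkeys : (l.foldl (fun d a => d.insert (key a) (v a)) PySem.Dict.empty).keys = l.map key := by
    simp only [PySem.Dict.keys, hit]
    simp [List.map_map]; rfl
  refine PySem.Dict.getD_of_mem_items _ ?_ (by rw [hkeys]; exact hnd) dflt
  rw [hit, ← hk]
  have : PySem.Dict.empty.items = ([] : List (κ × ν)) := rfl
  rw [this, List.nil_append]
  exact List.mem_map.mpr ⟨x, hx, rfl⟩

theorem pv_getD_foldl_sortpass (ks : List Int) (d : PySem.Dict Int (List (Int × Int))) (c : Int)
    (hnd : ks.Nodup) :
    ((ks.foldl (fun d t => d.insert t (PySem.List.sorted (d.getD t []) (fun x => x.2) true)) d).getD c [])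
      = if c ∈ ks then PySem.List.sorted (d.getD c []) (fun x => x.2) true else d.getD c [] := by
  induction ks generalizing d with
  | nil => simp
  | cons t ks ih =>
    have htk : t ∉ ks := (List.nodup_cons.mp hnd).1
    simp only [List.foldl_cons]
    rw [ih _ (List.nodup_cons.mp hnd).2]
    by_cases hc : c = t
    · subst hc
      simp [htk, PySem.Dict.getD_insert_self]
    · rw [PySem.Dict.getD_insert_of_ne _ _ _ hc]
      by_cases hcks : c ∈ ks <;> simp [hcks, hc]

theorem pv_mem_cand {excl : List Int} {n : Int} :
    n ∈ pvCand excl ↔ (1 ≤ n ∧ n < 39 ∧ n ∉ excl) := by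
  simp [pvCand, List.mem_filter, PySem.List.mem_pyRange_one]
  tauto

theorem pv_cand_nodup (excl : List Int) : (pvCand excl).Nodup :=
  (PySem.List.nodup_pyRange_one 1 39).filter _

theorem pv_mod10_eq {n : Int} (h : 1 ≤ n) : PySem.Int.mod n 10 = n % 10 :=
  PySem.Int.mod_eq_emod_of_pos (by omega)

theorem pv_mem_rawg {excl : List Int} {t n : Int} :
    n ∈ pvRawg excl t ↔ n ∈ pvCand excl ∧ PySem.Int.mod n 10 = t := by
  simp [pvRawg, List.mem_filter]

theorem pv_rawg_nodup (excl : List Int) (t : Int) : (pvRawg excl t).Nodup :=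
  (pv_cand_nodup excl).filter _

theorem pv_G_perm (excl nums : List Int) (t : Int) : (pvG excl nums t).Perm (pvRawg excl t) :=
  PySem.List.sorted_perm _ _ _

theorem pv_G_nodup (excl nums : List Int) (t : Int) : (pvG excl nums t).Nodup :=
  ((pv_G_perm excl nums t).nodup_iff).mpr (pv_rawg_nodup excl t)

theorem pv_mem_G {excl nums : List Int} {t n : Int} :
    n ∈ pvG excl nums t ↔ n ∈ pvCand excl ∧ PySem.Int.mod n 10 = t := by
  rw [(pv_G_perm excl nums t).mem_iff, pv_mem_rawg]

theorem pv_G_tag {excl nums : List Int} {t n : Int} (h : n ∈ pvG excl nums t) :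
    PySem.Int.mod n 10 = t := (pv_mem_G.mp h).2

theorem pv_G_disj (excl nums : List Int) :
    ∀ t, ∀ t', ∀ x, x ∈ pvG excl nums t → x ∈ pvG excl nums t' → t = t' := by
  intro t t' x h h'
  rw [← pv_G_tag h, ← pv_G_tag h']

theorem pv_G_len (excl nums : List Int) (t : Int) : (pvG excl nums t).length ≤ 4 := by
  rw [(pv_G_perm excl nums t).length_eq]
  have hsub : pvRawg excl t ⊆ [t, t + 10, t + 20, t + 30] := by
    intro n hn
    rcases pv_mem_rawg.mp hn with ⟨hc, hm⟩
    rcases pv_mem_cand.mp hc with ⟨h1, h2, _⟩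
    rw [pv_mod10_eq h1] at hm
    simp only [List.mem_cons, List.mem_singleton]
    omega
  have := ((pv_rawg_nodup excl t).subperm hsub).length_le
  simpa using this

theorem pv_index?_getElem {l : List Int} (hnd : l.Nodup) {k : Nat} (hk : k < l.length) :
    PySem.List.index? l l[k] = some k := by
  rw [PySem.List.index?_eq_some_iff]
  refine ⟨l.take k, l.drop (k+1), ?_, ?_, ?_⟩
  · rw [List.getElem_cons_drop]
    exact (List.take_append_drop k l).symm
  · rw [List.length_take]; omega
  · intro hmem
    rcases List.mem_iff_getElem.mp hmem with ⟨i, hi, hval⟩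
    rw [List.getElem_take] at hval
    have hik : i < k := by rw [List.length_take] at hi; omega
    have := (List.Nodup.getElem_inj_iff hnd).mp hval
    omega

theorem pv_mod10_mem_range {n : Int} (h1 : 1 ≤ n) :
    PySem.Int.mod n 10 ∈ PySem.List.pyRange 0 10 1 := by
  rw [PySem.List.mem_pyRange_one, pv_mod10_eq h1]
  omega

theorem pv_availBase_nodup (excl nums : List Int) : (pvAvailBase excl nums).Nodup :=
  (PySem.List.nodup_pyRange_one 0 10).filter _

theorem pv_avail_perm (excl nums : List Int) : (pvAvail excl nums).Perm (pvAvailBase excl nums) :=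
  PySem.List.sorted_perm _ _ _

theorem pv_avail_nodup (excl nums : List Int) : (pvAvail excl nums).Nodup :=
  ((pv_avail_perm excl nums).nodup_iff).mpr (pv_availBase_nodup excl nums)

theorem pv_mem_avail {excl nums : List Int} {t : Int} :
    t ∈ pvAvail excl nums ↔ t ∈ PySem.List.pyRange 0 10 1 ∧ pvG excl nums t ≠ [] := by
  rw [(pv_avail_perm excl nums).mem_iff]
  simp [pvAvailBase, List.mem_filter]

theorem pv_avail_len (excl nums : List Int) : (pvAvail excl nums).length ≤ 10 := by
  rw [(pv_avail_perm excl nums).length_eq]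
  unfold pvAvailBase
  have := List.length_filter_le (fun t => !(pvG excl nums t).isEmpty) (PySem.List.pyRange 0 10 1)
  have h2 : (PySem.List.pyRange 0 10 1).length = 10 := by
    rw [PySem.List.length_pyRange_one]; rfl
  omega

theorem pv_flatMap_opt_take {α : Type} (l : List α) (N : Nat) :
    (List.range N).flatMap (fun k => l[k]?.toList) = l.take N := by
  induction N with
  | zero => simp
  | succ n ih => rw [List.range_succ, List.flatMap_append, ih, List.take_add_one]; simp

theorem pv_flatMap_append_perm {α β : Type} (l : List α) (a b : α → List β) :
    (l.flatMap (fun k => a k ++ b k)).Perm (l.flatMap a ++ l.flatMap b) := by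
  induction l with
  | nil => simp
  | cons x l ih =>
    simp only [List.flatMap_cons]
    have h1 : (a x ++ b x ++ l.flatMap (fun k => a k ++ b k)).Perm
        (a x ++ b x ++ (l.flatMap a ++ l.flatMap b)) := List.Perm.append_left _ ih
    refine h1.trans ?_
    have h2 : (b x ++ (l.flatMap a ++ l.flatMap b)).Perm (l.flatMap a ++ (b x ++ l.flatMap b)) := by
      rw [← List.append_assoc, ← List.append_assoc]
      exact List.Perm.append_right _ List.perm_append_comm
    have h3 := List.Perm.append_left (a x) h2
    simpa [List.append_assoc] using h3

theorem pv_stream_perm (g : Int → List Int) (avail : List Int) (N : Nat)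
    (hlen : ∀ t ∈ avail, (g t).length ≤ N) :
    (pvP g avail N).Perm (avail.flatMap g) := by
  induction avail with
  | nil => simp [pvP, pvChunk]
  | cons t rest ih =>
    have hc : ∀ k, pvChunk g (t :: rest) k = (g t)[k]?.toList ++ pvChunk g rest k := by
      intro k; simp [pvChunk, List.filterMap_cons]; cases (g t)[k]? <;> simp
    unfold pvP
    rw [show (pvChunk g (t :: rest)) = fun k => (g t)[k]?.toList ++ pvChunk g rest k from funext hc]
    refine (pv_flatMap_append_perm _ _ _).trans ?_
    rw [pv_flatMap_opt_take (g t) N, List.take_of_length_le (hlen t (by simp))]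
    simp only [List.flatMap_cons]
    exact List.Perm.append_left _ (ih (fun t' ht' => hlen t' (by simp [ht'])))

theorem pv_pairwise_flatMap {α β : Type} (R : β → β → Prop) (l : List α) (f : α → List β)
    (hin : ∀ x ∈ l, (f x).Pairwise R)
    (hout : l.Pairwise (fun x y => ∀ u ∈ f x, ∀ v ∈ f y, R u v)) :
    (l.flatMap f).Pairwise R := by
  induction l with
  | nil => simp
  | cons x l ih =>
    simp only [List.flatMap_cons]
    rw [List.pairwise_append]
    refine ⟨hin x (by simp), ih (fun y hy => hin y (by simp [hy])) (List.Pairwise.of_cons hout), ?_⟩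
    intro u hu v hv
    rcases List.mem_flatMap.mp hv with ⟨y, hy, hvy⟩
    exact (List.pairwise_cons.mp hout).1 y hy u hu v hvy

theorem pvP_succ (g : Int → List Int) (avail : List Int) (k : Nat) :
    pvP g avail (k+1) = pvP g avail k ++ pvChunk g avail k := by
  unfold pvP; rw [List.range_succ, List.flatMap_append]; simp

theorem pvP_prefix (g : Int → List Int) (avail : List Int) (k N : Nat) (h : k ≤ N) :
    ∃ rest, pvP g avail N = pvP g avail k ++ rest := by
  obtain ⟨m, rfl⟩ := Nat.exists_eq_add_of_le h
  unfold pvP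
  rw [List.range_add, List.flatMap_append]
  exact ⟨_, rfl⟩

theorem pv_mem_pvP {g : Int → List Int} {avail : List Int} {k : Nat} {x : Int}
    (hx : x ∈ pvP g avail k) : ∃ t ∈ avail, ∃ r < k, r < (g t).length ∧ (g t)[r]! = x := by
  unfold pvP at hx
  rcases List.mem_flatMap.mp hx with ⟨r, hr, hxc⟩
  rcases List.mem_filterMap.mp hxc with ⟨t, ht, hsome⟩
  have hlt : r < (g t).length := by
    by_contra h
    rw [List.getElem?_eq_none (by omega)] at hsome; cases hsome
  refine ⟨t, ht, r, List.mem_range.mp hr, hlt, ?_⟩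
  rw [List.getElem!_eq_getElem?_getD, hsome]; rfl

-- x = (g t)[k] is not among the earlier picks

theorem pv_fresh (g : Int → List Int) (avail : List Int) (k : Nat)
    (hnd : avail.Nodup)
    (hgnd : ∀ t ∈ avail, (g t).Nodup)
    (hdisj : ∀ t ∈ avail, ∀ t' ∈ avail, ∀ x, x ∈ g t → x ∈ g t' → t = t')
    (zs ts' : List Int) (t : Int) (hsplit : avail = zs ++ t :: ts')
    (hk : k < (g t).length) :
    (g t)[k] ∉ pvP g avail k ++ zs.filterMap (fun t' => (g t')[k]?) := by
  have htav : t ∈ avail := by rw [hsplit]; simp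
  have hxgt : (g t)[k] ∈ g t := List.getElem_mem hk
  intro hmem
  rcases List.mem_append.mp hmem with h | h
  · rcases pv_mem_pvP h with ⟨t', ht', r, hrk, hrlen, hval⟩
    have hvr : (g t')[r] = (g t)[k] := by
      rw [List.getElem!_eq_getElem?_getD, List.getElem?_eq_getElem hrlen] at hval
      simpa using hval
    have hxgt' : (g t)[k] ∈ g t' := by
      rw [← hvr]; exact List.getElem_mem hrlen
    have heq := hdisj t' ht' t htav _ hxgt' hxgt
    subst heq
    have := (List.Nodup.getElem_inj_iff (hgnd t' ht')).mp hvr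
    omega
  · rcases List.mem_filterMap.mp h with ⟨t', ht', hsome⟩
    have htzs : t' ∈ avail := by rw [hsplit]; exact List.mem_append.mpr (Or.inl ht')
    have hrlen : k < (g t').length := by
      by_contra hh
      rw [List.getElem?_eq_none (by omega)] at hsome; cases hsome
    have hxgt' : (g t)[k] ∈ g t' := by
      have : (g t')[k] = (g t)[k] := by
        rw [List.getElem?_eq_getElem hrlen] at hsome; simpa using hsome
      rw [← this]; exact List.getElem_mem hrlen
    have heq := hdisj t' htzs t htav _ hxgt' hxgt
    subst heq
    have : t' ∉ zs := by
      have := hsplit ▸ hnd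
      rcases List.nodup_append.mp this with ⟨_, hnd2, hdisj2⟩
      intro hzz
      exact hdisj2 t' hzz t' (by simp) rfl
    exact this ht'

theorem pv_roundA (tg : PySem.Dict Int (List (Int × Int))) (avail : List Int) (g : Int → List Int)
    (hg : ∀ t ∈ avail, (tg.getD t []).map Prod.fst = g t)
    (hnd : avail.Nodup)
    (hgnd : ∀ t ∈ avail, (g t).Nodup)
    (hdisj : ∀ t ∈ avail, ∀ t' ∈ avail, ∀ x, x ∈ g t → x ∈ g t' → t = t')
    (k : Nat) :
    ∀ ts zs (s : List Int) (idx : PySem.Dict Int Int) (st : List Int × PySem.Dict Int Int),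
    avail = zs ++ ts →
    s = (pvP g avail k ++ zs.filterMap (fun t' => (g t')[k]?)).take 6 →
    (∀ t ∈ ts, idx.getD t 0 = ((min k (g t).length : Nat) : Int)) →
    (s.length < 6 → ∀ t ∈ zs, idx.getD t 0 = ((min (k+1) (g t).length : Nat) : Int)) →
    st = ts.foldl (fun (acc : List Int × PySem.Dict Int Int) tail =>
        if (6 : Int) ≤ (acc.1.length : Int) then acc
        else
          let group := tg.getD tail []
          let i := acc.2.getD tail 0
          if i < (group.length : Int) then
            let num := (PySem.List.pyGetD group i (0, 0)).1
            if num ∈ acc.1 then acc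
            else (acc.1 ++ [num], acc.2.insert tail (i + 1))
          else acc) (s, idx) →
    st.1 = (pvP g avail (k+1)).take 6 ∧
      (st.1.length < 6 → ∀ t ∈ avail, st.2.getD t 0 = ((min (k+1) (g t).length : Nat) : Int)) := by
  intro ts
  induction ts with
  | nil =>
    intro zs s idx st hsplit hs h3 h4 hst
    simp only [List.foldl_nil] at hst
    subst hst
    have hzs : zs = avail := by simpa using hsplit.symm
    subst hzs
    constructor
    · simp only [hs, pvP_succ]; rfl
    · intro hlen t ht; exact h4 hlen t ht
  | cons t ts' ih =>
    intro zs s idx st hsplit hs h3 h4 hst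
    simp only [List.foldl_cons] at hst
    have htav : t ∈ avail := by rw [hsplit]; simp
    have hslen : s.length ≤ 6 := by rw [hs]; simpa using List.length_take_le 6 _
    by_cases hfull : (6 : Int) ≤ (s.length : Int)
    · rw [if_pos hfull] at hst
      have hplen : 6 ≤ (pvP g avail k ++ zs.filterMap (fun t' => (g t')[k]?)).length := by
        rcases Nat.lt_or_ge (pvP g avail k ++ zs.filterMap (fun t' => (g t')[k]?)).length 6 with h | h
        · exfalso
          rw [hs, List.take_of_length_le (le_of_lt h)] at hfull
          push_cast at hfull
          omega
        · exact h
      have hs6 : s.length = 6 := by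
        rw [hs, List.length_take]
        omega
      refine ih (zs ++ [t]) s idx st (by rw [hsplit]; simp) ?_ (fun u hu => h3 u (by simp [hu])) ?_ hst
      · rw [hs, List.filterMap_append, ← List.append_assoc,
           List.take_append_of_le_length hplen]
      · intro hlen
        exact absurd hs6 (by omega)
    · rw [if_neg hfull] at hst
      have hslt : s.length < 6 := by
        rcases Nat.lt_or_ge s.length 6 with h | h
        · exact h
        · exfalso; exact hfull (by exact_mod_cast h)
      have hsfull : s = pvP g avail k ++ zs.filterMap (fun t' => (g t')[k]?) := by
        rcases Nat.lt_or_ge (pvP g avail k ++ zs.filterMap (fun t' => (g t')[k]?)).length 6 with h | h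
        · rw [hs, List.take_of_length_le (le_of_lt h)]
        · exfalso
          rw [hs, List.length_take] at hslt
          omega
      have hgl : (tg.getD t []).length = (g t).length := by
        rw [← hg t htav, List.length_map]
      have hit : idx.getD t 0 = ((min k (g t).length : Nat) : Int) := h3 t (by simp)
      have htts' : t ∉ ts' := by
        have := hsplit ▸ hnd
        rcases List.nodup_append.mp this with ⟨_, hnd2, _⟩
        exact (List.nodup_cons.mp hnd2).1
      have htzs : t ∉ zs := by
        have := hsplit ▸ hnd
        rcases List.nodup_append.mp this with ⟨_, _, hdisj2⟩
        intro hzz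
        exact hdisj2 t hzz t (by simp) rfl

      by_cases hkl : k < (g t).length
      · have hcond : idx.getD t 0 < ((tg.getD t []).length : Int) := by
          rw [hit, hgl]
          have : min k (g t).length = k := by omega
          rw [this]
          exact_mod_cast hkl
        rw [if_pos hcond] at hst
        have hnum : (PySem.List.pyGetD (tg.getD t []) (idx.getD t 0) (0, 0)).1 = (g t)[k] := by
          rw [hit]
          have : min k (g t).length = k := by omega
          rw [this, PySem.List.pyGetD_natCast]
          rw [List.getD_eq_getElem _ _ (by omega)]
          have hmap := hg t htav
          have hk2 : k < (List.map Prod.fst (tg.getD t [])).length := by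
            rw [List.length_map]; omega
          have h5 : (List.map Prod.fst (tg.getD t []))[k] = (g t)[k] :=
            List.getElem_of_eq hmap hk2
          rw [List.getElem_map] at h5
          exact h5
        rw [hnum] at hst
        have hfresh := pv_fresh g avail k hnd hgnd hdisj zs ts' t hsplit hkl
        rw [← hsfull] at hfresh
        rw [if_neg hfresh] at hst
        have hsome : (g t)[k]? = some ((g t)[k]) := List.getElem?_eq_getElem hkl
        refine ih (zs ++ [t]) (s ++ [(g t)[k]]) (idx.insert t (idx.getD t 0 + 1)) st
          (by rw [hsplit]; simp) ?_ ?_ ?_ hst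
        · rw [List.filterMap_append, ← List.append_assoc, ← hsfull]
          simp only [List.filterMap_cons, List.filterMap_nil, hsome]
          rw [List.take_of_length_le (by simp; omega)]
        · intro u hu
          rw [PySem.Dict.getD_insert_of_ne _ _ _ (by rintro rfl; exact htts' hu)]
          exact h3 u (by simp [hu])
        · intro hlen u hu
          rcases List.mem_append.mp hu with hu1 | hu1
          · rw [PySem.Dict.getD_insert_of_ne _ _ _ (by rintro rfl; exact htzs hu1)]
            exact h4 hslt u hu1
          · have hut : u = t := by simpa using hu1
            subst hut
            rw [PySem.Dict.getD_insert_self, hit]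
            have h1 : min k (g u).length = k := by omega
            have h2 : min (k+1) (g u).length = k+1 := by omega
            rw [h1, h2]
            push_cast
            ring
      · have hcond : ¬ (idx.getD t 0 < ((tg.getD t []).length : Int)) := by
          rw [hit, hgl]
          have : min k (g t).length = (g t).length := by omega
          rw [this]
          simp
        rw [if_neg hcond] at hst
        have hnone : (g t)[k]? = none := List.getElem?_eq_none (by omega)
        refine ih (zs ++ [t]) s idx st (by rw [hsplit]; simp) ?_
          (fun u hu => h3 u (by simp [hu])) ?_ hst
        · rw [List.filterMap_append, ← List.append_assoc, ← hsfull]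
          simp only [List.filterMap_cons, List.filterMap_nil, hnone]
          rw [List.append_nil]
          rw [hsfull] at hslt ⊢
          rw [List.take_of_length_le (by omega)]
        · intro hlen u hu
          rcases List.mem_append.mp hu with hu | hu
          · exact h4 hslt u hu
          · have hut : u = t := by simpa using hu
            subst hut
            rw [hit]
            have : min k (g u).length = (g u).length := by omega
            have h2 : min (k+1) (g u).length = (g u).length := by omega
            rw [this, h2]

theorem pv_loopA_general (tg : PySem.Dict Int (List (Int × Int))) (avail : List Int) (g : Int → List Int)
    (hg : ∀ t ∈ avail, (tg.getD t []).map Prod.fst = g t)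
    (hnd : avail.Nodup)
    (hgnd : ∀ t ∈ avail, (g t).Nodup)
    (hdisj : ∀ t ∈ avail, ∀ t' ∈ avail, ∀ x, x ∈ g t → x ∈ g t' → t = t') :
    ∀ (fuel k : Nat) (s : List Int) (idx : PySem.Dict Int Int), fuel + k = 11 →
    s = (pvP g avail k).take 6 →
    (s.length < 6 → ∀ t ∈ avail, idx.getD t 0 = ((min k (g t).length : Nat) : Int)) →
    tailBalanceLoopA tg avail fuel s idx = (pvP g avail 11).take 6 := by
  intro fuel
  induction fuel with
  | zero =>
    intro k s idx hfk hs hidx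
    have : k = 11 := by omega
    subst this
    simpa [tailBalanceLoopA] using hs
  | succ fuel ih =>
    intro k s idx hfk hs hidx
    rw [tailBalanceLoopA]
    by_cases hlt : (s.length : Int) < 6
    · rw [if_pos hlt]
      have hslt : s.length < 6 := by exact_mod_cast hlt
      have hsfull : s = pvP g avail k := by
        rcases Nat.lt_or_ge (pvP g avail k).length 6 with h | h
        · rw [hs, List.take_of_length_le (le_of_lt h)]
        · exfalso; rw [hs, List.length_take] at hslt; omega
      have hround := pv_roundA tg avail g hg hnd hgnd hdisj k avail [] s idx
        (avail.foldl (fun (acc : List Int × PySem.Dict Int Int) tail =>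
          if (6 : Int) ≤ (acc.1.length : Int) then acc
          else
            let group := tg.getD tail []
            let i := acc.2.getD tail 0
            if i < (group.length : Int) then
              let num := (PySem.List.pyGetD group i (0, 0)).1
              if num ∈ acc.1 then acc
              else (acc.1 ++ [num], acc.2.insert tail (i + 1))
            else acc) (s, idx))
        (by simp) (by simpa using hs) (fun t ht => hidx hslt t ht) (by simp) rfl
      exact ih (k+1) _ _ (by omega) hround.1 hround.2
    · rw [if_neg hlt]
      have hslen : s.length ≤ 6 := by rw [hs]; simpa using List.length_take_le 6 _
      have hs6 : s.length = 6 := by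
        push_cast at hlt; omega
      have hplen : 6 ≤ (pvP g avail k).length := by
        rcases Nat.lt_or_ge (pvP g avail k).length 6 with h | h
        · exfalso; rw [hs, List.take_of_length_le (le_of_lt h)] at hs6; omega
        · exact h
      obtain ⟨rest, hrest⟩ := pvP_prefix g avail k 11 (by omega)
      rw [hs, hrest, List.take_append_of_le_length hplen]

theorem pv_loopA_eq (tg : PySem.Dict Int (List (Int × Int))) (avail : List Int) (g : Int → List Int)
    (hg : ∀ t ∈ avail, (tg.getD t []).map Prod.fst = g t)
    (hnd : avail.Nodup)
    (hgnd : ∀ t ∈ avail, (g t).Nodup)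
    (hdisj : ∀ t ∈ avail, ∀ t' ∈ avail, ∀ x, x ∈ g t → x ∈ g t' → t = t')
    (idx : PySem.Dict Int Int)
    (hidx : ∀ t ∈ avail, idx.getD t 0 = 0) :
    tailBalanceLoopA tg avail 11 [] idx = (pvP g avail 11).take 6 := by
  refine pv_loopA_general tg avail g hg hnd hgnd hdisj 11 0 [] idx (by omega) (by simp [pvP]) ?_
  intro _ t ht
  simpa using hidx t ht

theorem pv_flatMap_perm_congr (l : List Int) (f g : Int → List Int)
    (h : ∀ t ∈ l, (f t).Perm (g t)) : (l.flatMap f).Perm (l.flatMap g) := by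
  induction l with
  | nil => simp
  | cons t l ih =>
    simp only [List.flatMap_cons]
    exact (h t (by simp)).append (ih (fun u hu => h u (by simp [hu])))

theorem pv_flatMap_filter_of_empty (l : List Int) (p : Int → Bool) (f : Int → List Int)
    (h : ∀ t ∈ l, p t = false → f t = []) : (l.filter p).flatMap f = l.flatMap f := by
  induction l with
  | nil => simp
  | cons t l ih =>
    by_cases hp : p t
    · rw [List.filter_cons_of_pos hp, List.flatMap_cons, List.flatMap_cons,
        ih (fun u hu => h u (by simp [hu]))]
    · rw [List.filter_cons_of_neg (by simpa using hp), List.flatMap_cons,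
        h t (by simp) (by simpa using hp), List.nil_append,
        ih (fun u hu => h u (by simp [hu]))]

theorem pv_stream_perm_cand (excl nums : List Int) :
    (pvStream excl nums).Perm (pvCand excl) := by
  refine ((pv_stream_perm _ _ 11 (fun t _ => (pv_G_len excl nums t).trans (by omega))).trans ?_)
  refine ((List.Perm.flatMap_right _ (pv_avail_perm excl nums)).trans ?_)
  refine ((pv_flatMap_perm_congr _ _ (pvRawg excl) (fun t _ => pv_G_perm excl nums t)).trans ?_)
  have h1 : (pvAvailBase excl nums).flatMap (pvRawg excl)
      = (PySem.List.pyRange 0 10 1).flatMap (pvRawg excl) := by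
    unfold pvAvailBase
    refine pv_flatMap_filter_of_empty _ _ _ ?_
    intro t _ hfalse
    have hge : pvG excl nums t = [] := by
      have h2 : (pvG excl nums t).isEmpty = true := by simpa using hfalse
      exact List.isEmpty_iff.mp h2
    exact (PySem.List.sorted_eq_nil_iff _ _ _).mp hge
  rw [h1]
  refine pv_partition_perm (fun n => PySem.Int.mod n 10) (pvCand excl) _
    (PySem.List.nodup_pyRange_one 0 10) ?_
  intro n hn
  exact pv_mod10_mem_range (pv_mem_cand.mp hn).1

-- mirror definitions of the let-chain of tail_balance_bet_alt

def pvCandB (excl : List Int) : List Int :=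
  (PySem.List.pyRange 1 39 1).filter (fun n => n ∉ PySem.Set.ofList excl)

def pvGroupsB (excl nums : List Int) : PySem.Dict Int (List Int) :=
  (PySem.List.pyRange 0 10 1).foldl (fun d t =>
    d.insert t (PySem.List.sorted ((pvCandB excl).filter (fun n => PySem.Int.mod n 10 == t))
      (fun n => (PySem.Dict.counter nums).getD n 0) true)) PySem.Dict.empty

def pvRankedB (excl nums : List Int) : List Int :=
  PySem.List.sorted ((PySem.List.pyRange 0 10 1).filter (fun t => !((pvGroupsB excl nums).getD t []).isEmpty))
    (fun t => (PySem.Dict.counter nums).getD (PySem.List.pyGetD ((pvGroupsB excl nums).getD t []) 0 0) 0) true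

def pvRankB (excl nums : List Int) : PySem.Dict Int Int :=
  (PySem.List.enumerate (pvRankedB excl nums) 0).foldl (fun d p => d.insert p.2 p.1) PySem.Dict.empty

def pvKeyB (excl nums : List Int) (n : Int) : Int :=
  10 * (((PySem.List.index? ((pvGroupsB excl nums).getD (PySem.Int.mod n 10) []) n).getD 0 : Nat) : Int)
    + (pvRankB excl nums).getD (PySem.Int.mod n 10) 0

theorem pv_candB_eq (excl : List Int) : pvCandB excl = pvCand excl := by
  unfold pvCandB pvCand
  apply List.filter_congr
  intro n _
  simp [PySem.Set.mem_ofList]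

-- placeholders for proved lemmas

theorem pv_counter_getD_eq (nums : List Int) :
    (fun n => (PySem.Dict.counter nums).getD n 0) = pvF nums :=
  funext fun n => by rw [PySem.Dict.getD_counter]; rfl

theorem pv_groupsB_getD (excl nums : List Int) (t : Int) (ht : t ∈ PySem.List.pyRange 0 10 1) :
    (pvGroupsB excl nums).getD t [] = pvG excl nums t := by
  unfold pvGroupsB
  rw [pv_getD_foldl_insert_fresh (PySem.List.pyRange 0 10 1) (fun a => a)
    (fun a => PySem.List.sorted ((pvCandB excl).filter (fun n => PySem.Int.mod n 10 == a))
      (fun n => (PySem.Dict.counter nums).getD n 0) true) t []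
    (by simpa using PySem.List.nodup_pyRange_one 0 10) t ht rfl]
  rw [pv_candB_eq, pv_counter_getD_eq]
  rfl

theorem pv_rankedB_eq (excl nums : List Int) : pvRankedB excl nums = pvAvail excl nums := by
  unfold pvRankedB pvAvail
  have hbase : (PySem.List.pyRange 0 10 1).filter (fun t => !((pvGroupsB excl nums).getD t []).isEmpty)
      = pvAvailBase excl nums := by
    unfold pvAvailBase
    apply List.filter_congr
    intro t ht
    rw [pv_groupsB_getD excl nums t ht]
  rw [hbase]
  refine pv_sorted_rev_congr _ _ _ ?_
  intro t ht
  have htr : t ∈ PySem.List.pyRange 0 10 1 := by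
    unfold pvAvailBase at ht; exact (List.mem_filter.mp ht).1
  have hne : pvG excl nums t ≠ [] := by
    unfold pvAvailBase at ht
    have := (List.mem_filter.mp ht).2
    simpa using this
  rw [pv_groupsB_getD excl nums t htr]
  rcases hG : pvG excl nums t with _ | ⟨h0, rest⟩
  · exact absurd hG hne
  · have hh0 : h0 ∈ pvCand excl := by
      have : h0 ∈ pvG excl nums t := by rw [hG]; simp
      exact (pv_mem_G.mp this).1
    rw [PySem.List.pyGetD_zero]
    simp only [List.getD, List.headD]
    rw [PySem.Dict.getD_counter]
    rfl

theorem pv_rankB_getD (excl nums : List Int) (j : Nat) (hj : j < (pvAvail excl nums).length) :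
    (pvRankB excl nums).getD ((pvAvail excl nums)[j]'hj) 0 = (j : Int) := by
  unfold pvRankB
  rw [pv_rankedB_eq]
  have hmem : ((j : Int), (pvAvail excl nums)[j]'hj) ∈ PySem.List.enumerate (pvAvail excl nums) 0 := by
    rw [PySem.List.enumerate_eq_zipIdx_map]
    refine List.mem_map.mpr ⟨((pvAvail excl nums)[j]'hj, j), ?_, by simp⟩
    have : (pvAvail excl nums).zipIdx[j]'(by simpa using hj) = ((pvAvail excl nums)[j]'hj, j) := by
      simp [List.getElem_zipIdx]
    rw [← this]
    exact List.getElem_mem (by simpa using hj)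
  have hnd : ((PySem.List.enumerate (pvAvail excl nums) 0).map (fun p => p.2)).Nodup := by
    have := PySem.List.map_snd_enumerate (pvAvail excl nums) 0
    rw [this]
    exact pv_avail_nodup excl nums
  exact pv_getD_foldl_insert_fresh _ (fun p => p.2) (fun p => p.1) _ 0 hnd _ hmem rfl

theorem pv_keyB_at (excl nums : List Int) (k j : Nat) (hj : j < (pvAvail excl nums).length)
    (hk : k < (pvG excl nums ((pvAvail excl nums)[j]'hj)).length) :
    pvKeyB excl nums ((pvG excl nums ((pvAvail excl nums)[j]'hj))[k]'hk) = 10 * (k : Int) + (j : Int) := by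
  set t := (pvAvail excl nums)[j]'hj with hts
  have htav : t ∈ pvAvail excl nums := List.getElem_mem hj
  have htr : t ∈ PySem.List.pyRange 0 10 1 := (pv_mem_avail.mp htav).1
  have hu : (pvG excl nums t)[k] ∈ pvG excl nums t := List.getElem_mem hk
  have htag : PySem.Int.mod ((pvG excl nums t)[k]) 10 = t := pv_G_tag hu
  unfold pvKeyB
  rw [htag, pv_groupsB_getD excl nums t htr,
    pv_index?_getElem (pv_G_nodup excl nums t) hk]
  rw [hts, pv_rankB_getD excl nums j hj]
  simp

theorem pv_pick_eq (excl nums : List Int) :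
    PySem.List.sorted (pvCand excl) (pvKeyB excl nums) false = pvStream excl nums := by
  refine PySem.List.sorted_eq_of_perm_of_pairwise_lt _ _ _ (pv_stream_perm_cand excl nums) ?_
  unfold pvStream pvP
  refine pv_pairwise_flatMap _ _ _ ?_ ?_
  · -- within a chunk
    intro k _
    unfold pvChunk
    rw [List.pairwise_filterMap]
    rw [List.pairwise_iff_getElem]
    intro a b ha hb hab
    intro u hu v hv
    have hka : k < (pvG excl nums ((pvAvail excl nums)[a])).length := by
      by_contra h
      rw [List.getElem?_eq_none (by omega)] at hu; cases hu
    have hkb : k < (pvG excl nums ((pvAvail excl nums)[b])).length := by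
      by_contra h
      rw [List.getElem?_eq_none (by omega)] at hv; cases hv
    have hu' : u = (pvG excl nums ((pvAvail excl nums)[a]))[k] := by
      rw [List.getElem?_eq_getElem hka] at hu; exact (Option.some_inj.mp hu).symm
    have hv' : v = (pvG excl nums ((pvAvail excl nums)[b]))[k] := by
      rw [List.getElem?_eq_getElem hkb] at hv; exact (Option.some_inj.mp hv).symm
    rw [hu', hv', pv_keyB_at excl nums k a ha hka, pv_keyB_at excl nums k b hb hkb]
    omega
  · -- across chunks
    have hKey : ∀ (k : Nat) (u : Int), u ∈ pvChunk (pvG excl nums) (pvAvail excl nums) k →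
        ∃ j : Nat, j < 10 ∧ pvKeyB excl nums u = 10 * (k : Int) + (j : Int) := by
      intro k u hu
      rcases List.mem_filterMap.mp hu with ⟨t, ht, hsome⟩
      rcases List.mem_iff_getElem.mp ht with ⟨j, hj, hjt⟩
      have hk : k < (pvG excl nums t).length := by
        by_contra h
        rw [List.getElem?_eq_none (by omega)] at hsome; cases hsome
      have hu' : u = (pvG excl nums t)[k] := by
        rw [List.getElem?_eq_getElem hk] at hsome; exact (Option.some_inj.mp hsome).symm
      refine ⟨j, by have := pv_avail_len excl nums; omega, ?_⟩
      subst hjt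
      rw [hu']
      exact pv_keyB_at excl nums k j hj hk
    rw [List.pairwise_iff_getElem]
    intro a b ha hb hab u hu v hv
    rw [List.getElem_range] at hu
    rw [List.getElem_range] at hv
    rcases hKey a u hu with ⟨j1, hj1, hk1⟩
    rcases hKey b v hv with ⟨j2, _, hk2⟩
    rw [hk1, hk2]
    push_cast
    omega

-- ---------- the two ports against the common form ----------

def pvTg0 : PySem.Dict Int (List (Int × Int)) :=
  (PySem.List.pyRange 0 10 1).foldl (fun d t => d.insert t ([] : List (Int × Int))) PySem.Dict.empty

def pvTg1 (excl nums : List Int) : PySem.Dict Int (List (Int × Int)) :=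
  (PySem.List.pyRange 1 39 1).foldl (fun d n =>
    if n ∉ excl then d.modify (PySem.Int.mod n 10) [] (· ++ [(n, (PySem.Dict.counter nums).getD n 0)]) else d) pvTg0

def pvTg2 (excl nums : List Int) : PySem.Dict Int (List (Int × Int)) :=
  (pvTg1 excl nums).keys.foldl
    (fun d t => d.insert t (PySem.List.sorted (d.getD t []) (fun x => x.2) true)) (pvTg1 excl nums)

def pvAvailA (excl nums : List Int) : List Int :=
  PySem.List.sorted
    ((PySem.List.pyRange 0 10 1).filter (fun t => !((pvTg2 excl nums).getD t []).isEmpty))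
    (fun t => if ((pvTg2 excl nums).getD t []).isEmpty then 0
              else (PySem.List.pyGetD ((pvTg2 excl nums).getD t []) 0 (0, 0)).2) true

def pvIdx0 : PySem.Dict Int Int :=
  (PySem.List.pyRange 0 10 1).foldl (fun d t => d.insert t (0 : Int)) PySem.Dict.empty

def pvSelA (excl nums : List Int) : List Int :=
  tailBalanceLoopA (pvTg2 excl nums) (pvAvailA excl nums) 11 [] pvIdx0


theorem pv_tg0_getD (c : Int) : pvTg0.getD c [] = [] := by
  unfold pvTg0
  exact pv_getD_foldl_insert_const' _ _ _ _ (by simp)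

theorem pv_tg0_keys_nodup : pvTg0.keys.Nodup := by
  unfold pvTg0
  exact PySem.Dict.nodup_keys_foldl_insert _ (fun _ _ => []) _ (by simp)

theorem pv_tg0_keys_mem (t : Int) (ht : t ∈ PySem.List.pyRange 0 10 1) : t ∈ pvTg0.keys := by
  unfold pvTg0
  rw [PySem.Dict.keys_foldl_insert _ (fun _ _ => ([] : List (Int × Int)))]
  have : (PySem.Dict.empty : PySem.Dict Int (List (Int × Int))).keys = [] := by simp
  rw [this, PySem.Set.update_nil_left, PySem.Set.mem_ofList]
  exact ht

theorem pv_tg1_eq (excl nums : List Int) :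
    pvTg1 excl nums = (pvCand excl).foldl
      (fun d n => d.modify (PySem.Int.mod n 10) [] (· ++ [(n, (PySem.Dict.counter nums).getD n 0)])) pvTg0 := by
  unfold pvTg1 pvCand
  rw [List.foldl_filter]
  congr 1
  funext d n
  by_cases h : n ∈ excl <;> simp [h]

theorem pv_foldl_modify_as_pairs (l : List Int) (key : Int → Int) (val : Int → (Int × Int))
    (d : PySem.Dict Int (List (Int × Int))) :
    l.foldl (fun d n => d.modify (key n) [] (· ++ [val n])) d
      = (l.map (fun n => (key n, val n))).foldl (fun d p => d.modify p.1 [] (· ++ [p.2])) d := by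
  induction l generalizing d with
  | nil => rfl
  | cons n l ih => simp only [List.foldl_cons, List.map_cons, ih]

theorem pv_tg1_getD (excl nums : List Int) (c : Int) :
    (pvTg1 excl nums).getD c [] = (pvRawg excl c).map (fun n => (n, pvF nums n)) := by
  rw [pv_tg1_eq]
  rw [pv_foldl_modify_as_pairs (pvCand excl) (fun n => PySem.Int.mod n 10)
    (fun n => (n, (PySem.Dict.counter nums).getD n 0)) pvTg0]
  rw [PySem.Dict.getD_foldl_modify_append]
  rw [pv_tg0_getD, List.nil_append, List.filter_map, List.map_map]
  have hfn : ((fun p : Int × (Int × Int) => p.1 == c) ∘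
      (fun n => (PySem.Int.mod n 10, (n, (PySem.Dict.counter nums).getD n 0))))
      = fun n => PySem.Int.mod n 10 == c := rfl
  rw [hfn]
  unfold pvRawg
  apply List.map_congr_left
  intro n _
  simp only [Function.comp_apply, PySem.Dict.getD_counter]
  rfl

theorem pv_tg1_keys_nodup (excl nums : List Int) : (pvTg1 excl nums).keys.Nodup := by
  rw [pv_tg1_eq]
  exact PySem.Dict.nodup_keys_foldl_modify_key _ (fun n => PySem.Int.mod n 10) _
    (fun _ n => (· ++ [(n, (PySem.Dict.counter nums).getD n 0)])) _ pv_tg0_keys_nodup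

theorem pv_tg1_keys_mem (excl nums : List Int) (t : Int) (ht : t ∈ PySem.List.pyRange 0 10 1) :
    t ∈ (pvTg1 excl nums).keys := by
  rw [pv_tg1_eq]
  rw [PySem.Dict.keys_foldl_modify_key _ (fun n => PySem.Int.mod n 10) _
    (fun _ n => (· ++ [(n, (PySem.Dict.counter nums).getD n 0)]))]
  rw [PySem.Set.mem_update]
  exact Or.inl (pv_tg0_keys_mem t ht)

theorem pv_tg2_getD (excl nums : List Int) (c : Int) (hc : c ∈ PySem.List.pyRange 0 10 1) :
    (pvTg2 excl nums).getD c [] = (pvG excl nums c).map (fun n => (n, pvF nums n)) := by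
  unfold pvTg2
  rw [pv_getD_foldl_sortpass _ _ _ (pv_tg1_keys_nodup excl nums)]
  rw [if_pos (pv_tg1_keys_mem excl nums c hc)]
  rw [pv_tg1_getD]
  exact pv_sorted_rev_map_pair (pvRawg excl c) (pvF nums)

theorem pv_availA_eq (excl nums : List Int) : pvAvailA excl nums = pvAvail excl nums := by
  unfold pvAvailA pvAvail
  have hbase : (PySem.List.pyRange 0 10 1).filter (fun t => !((pvTg2 excl nums).getD t []).isEmpty)
      = pvAvailBase excl nums := by
    unfold pvAvailBase
    apply List.filter_congr
    intro t ht
    rw [pv_tg2_getD excl nums t ht, List.isEmpty_map]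
  rw [hbase]
  refine pv_sorted_rev_congr _ _ _ ?_
  intro t ht
  have htr : t ∈ PySem.List.pyRange 0 10 1 := by
    unfold pvAvailBase at ht; exact (List.mem_filter.mp ht).1
  have hne : pvG excl nums t ≠ [] := by
    unfold pvAvailBase at ht
    have := (List.mem_filter.mp ht).2
    simpa using this
  rw [pv_tg2_getD excl nums t htr]
  rcases hG : pvG excl nums t with _ | ⟨h0, rest⟩
  · exact absurd hG hne
  · rw [if_neg (by simp)]
    rw [PySem.List.pyGetD_zero]
    simp

theorem pv_idx0_getD (t : Int) : pvIdx0.getD t 0 = 0 := by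
  unfold pvIdx0
  exact pv_getD_foldl_insert_const' _ _ _ _ (by simp)

theorem pv_selA_eq (excl nums : List Int) : pvSelA excl nums = (pvStream excl nums).take 6 := by
  unfold pvSelA pvStream
  rw [pv_availA_eq]
  refine pv_loopA_eq _ _ (pvG excl nums) ?_ (pv_avail_nodup excl nums)
    (fun t _ => pv_G_nodup excl nums t)
    (fun t _ t' _ x hx hx' => pv_G_disj excl nums t t' x hx hx')
    pvIdx0 (fun t _ => pv_idx0_getD t)
  intro t ht
  rw [pv_tg2_getD excl nums t (pv_mem_avail.mp ht).1, List.map_map]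
  rw [show (Prod.fst ∘ fun n : Int => (n, pvF nums n)) = fun n : Int => n from rfl]
  exact List.map_id' _

theorem pv_A_eq (history : List (List (String × List Int))) (window : Int) (exclude : Option (List Int)) :
    tail_balance_bet history window exclude = pvResult (exclude.getD []) (pvNums history window) := by
  have h0 : tail_balance_bet history window exclude =
      (let excl := exclude.getD [];
       let nums := pvNums history window;
       let selected := pvSelA excl nums;
       let selected2 :=
         if (selected.length : Int) < 6 then
           selected ++ PySem.List.slice
             (PySem.List.sorted
               ((PySem.List.pyRange 1 39 1).filter (fun n => n ∉ selected ∧ n ∉ excl))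
               (fun x => (PySem.Dict.counter nums).getD x 0) true)
             none (some (6 - (selected.length : Int)))
         else selected;
       PySem.List.sorted (PySem.List.slice selected2 none (some 6)) (fun x => x) false) := rfl
  rw [h0]
  dsimp only
  rw [pv_selA_eq]
  set excl := exclude.getD [] with hexcl
  set nums := pvNums history window with hnums
  set S := pvStream excl nums with hS
  have hfinal : ∀ sel2 : List Int, sel2 = S.take 6 →
      PySem.List.sorted (PySem.List.slice sel2 none (some 6)) (fun x => x) false
        = pvResult excl nums := by
    intro sel2 hsel2
    rw [hsel2, PySem.List.slice_to _ (by norm_num)]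
    unfold pvResult
    rw [show ((6 : Int).toNat) = 6 from rfl, List.take_take, min_self, ← hS]
  by_cases hlen : ((S.take 6).length : Int) < 6
  · rw [if_pos hlen]
    have hS6 : S.length < 6 := by
      rw [List.length_take] at hlen
      push_cast at hlen
      omega
    have hTake : S.take 6 = S := List.take_of_length_le (by omega)
    have hrem : (PySem.List.pyRange 1 39 1).filter
        (fun n => n ∉ S.take 6 ∧ n ∉ excl) = [] := by
      rw [List.filter_eq_nil_iff]
      intro n hn
      by_cases hex : n ∈ excl
      · simp [hex]
      · have hnc : n ∈ pvCand excl := by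
          rw [pv_mem_cand]
          rcases PySem.List.mem_pyRange_one.mp hn with ⟨h1, h2⟩
          exact ⟨h1, h2, hex⟩
        have hnS : n ∈ S := (pv_stream_perm_cand excl nums).mem_iff.mpr hnc
        rw [hTake]
        simp [hnS]
    rw [hrem]
    rw [show PySem.List.sorted ([] : List Int)
        (fun x => (PySem.Dict.counter nums).getD x 0) true = [] from
      (PySem.List.sorted_eq_nil_iff _ _ _).mpr rfl]
    rw [PySem.List.slice_to ([] : List Int) (by omega), List.take_nil, List.append_nil]
    exact hfinal _ rfl
  · rw [if_neg hlen]
    exact hfinal _ rfl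

theorem pv_B_eq (history : List (List (String × List Int))) (window : Int) (exclude : Option (List Int)) :
    tail_balance_bet_alt history window exclude = pvResult (exclude.getD []) (pvNums history window) := by
  have h0 : tail_balance_bet_alt history window exclude =
      PySem.List.sorted (PySem.List.slice
        (PySem.List.sorted (pvCandB (exclude.getD []))
          (pvKeyB (exclude.getD []) (pvNums history window)) false)
        none (some 6)) (fun x => x) false := rfl
  rw [h0, pv_candB_eq, pv_pick_eq]
  unfold pvResult
  rw [PySem.List.slice_to _ (by norm_num)]
  rfl


-- ===== VERDICT (by name: the statement is the Claim_ definition above) =====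
theorem tail_balance_bet_spec : Claim_equal_tail_balance_bet := by
  intro history window exclude _ _
  unfold Spec_tail_balance_bet
  rw [pv_A_eq, pv_B_eq]
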